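-- pv_equiv track=rewrite | github.com/MAOJIASONG/VisualReasonBench | Stacking_scaling/polypuzzle_batch.py | enforce_min_piece
-- ===== SOURCE A (Python) =====
-- from typing import List, Tuple, Set, Dict
--
-- Vec = Tuple[int,int,int]
--
-- def enforce_min_piece(pieces: List[Set[Vec]], min_piece: int) -> List[Set[Vec]]:
--     pieces = [set(p) for p in pieces]
--     changed = True
--     while changed:
--         changed = False
--         for i in range(len(pieces)):
--             if i >= len(pieces): break
--             if len(pieces[i]) < min_piece:
--                 best_j, best_score = None, -1
--                 for j in range(len(pieces)):
--                     if j==i: continue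
--                     score = 0
--                     for x,y,z in pieces[i]:
--                         if (x+1,y,z) in pieces[j]: score += 1
--                         if (x-1,y,z) in pieces[j]: score += 1
--                         if (x,y+1,z) in pieces[j]: score += 1
--                         if (x,y-1,z) in pieces[j]: score += 1
--                         if (x,y,z+1) in pieces[j]: score += 1
--                         if (x,y,z-1) in pieces[j]: score += 1
--                     if score > best_score:
--                         best_score, best_j = score, j
--                 if best_j is None:
--                     best_j = max(range(len(pieces)), key=lambda k: (k!=i, len(pieces[k])))
--                 pieces[best_j] |= pieces[i]
--                 pieces.pop(i)
--                 changed = True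
--                 break
--     return pieces
-- ===== SOURCE B (Python) =====
-- def enforce_min_piece(pieces, min_piece):
--     ps = [set(p) for p in pieces]
--     i = 0
--     while i < len(ps):
--         if len(ps[i]) >= min_piece:
--             i += 1
--             continue
--         if len(ps) == 1:
--             # a lone undersized piece has no neighbor to merge into; drop it
--             ps.pop(i)
--             continue
--         # hash-index the 6-neighborhood of the small piece once, then score
--         # each other piece by summing lookups of its own cells
--         cnt = {}
--         for (x, y, z) in ps[i]:
--             for n in ((x+1, y, z), (x-1, y, z), (x, y+1, z),
--                       (x, y-1, z), (x, y, z+1), (x, y, z-1)):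
--                 cnt[n] = cnt.get(n, 0) + 1
--         best_j = max((j for j in range(len(ps)) if j != i),
--                      key=lambda j: sum(cnt.get(c, 0) for c in ps[j]))
--         ps[best_j] |= ps[i]
--         ps.pop(i)
--     return ps
-- ===== Notes on version B (the rewrite author's own statement) =====
-- stated objective: alternative
-- what changed: B replaces A's restart-the-scan-after-every-merge loop and its per-candidate nested membership scoring (small piece rescanned against every other piece) by a single forward pass that hash-indexes the small piece's 6-neighbourhood into one counter and scores each candidate piece by dictionary lookups, picking best_j with max(..., key=...).
import Mathlib
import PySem

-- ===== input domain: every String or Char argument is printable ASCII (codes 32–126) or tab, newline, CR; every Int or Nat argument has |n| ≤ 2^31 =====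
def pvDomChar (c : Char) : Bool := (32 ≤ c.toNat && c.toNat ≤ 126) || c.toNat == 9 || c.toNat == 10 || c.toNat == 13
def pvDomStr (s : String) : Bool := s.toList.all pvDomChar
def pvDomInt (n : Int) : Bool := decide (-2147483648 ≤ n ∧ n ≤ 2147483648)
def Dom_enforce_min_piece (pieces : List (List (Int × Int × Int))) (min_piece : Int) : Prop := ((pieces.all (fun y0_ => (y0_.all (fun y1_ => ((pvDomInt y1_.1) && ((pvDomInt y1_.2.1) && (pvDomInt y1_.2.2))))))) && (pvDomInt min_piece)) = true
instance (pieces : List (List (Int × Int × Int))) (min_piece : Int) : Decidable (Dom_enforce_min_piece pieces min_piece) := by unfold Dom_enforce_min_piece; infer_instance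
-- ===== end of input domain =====

-- B replaces A's per-pair nested membership scoring (rescanning the small piece against
-- every other piece) by one hash counter of the small piece's 6-neighbourhood, scored by
-- lookup, and a single forward pass instead of restarting the scan after every merge.

-- ===== PORT A =====
-- the six `if (x±1,y,z) in pieces[j]: score += 1` statements of A's inner loop
def pvCellScoreA (c : Int × Int × Int) (pj : List (Int × Int × Int)) (s : Int) : Int :=
  let s := if (c.1 + 1, c.2.1, c.2.2) ∈ pj then s + 1 else s
  let s := if (c.1 - 1, c.2.1, c.2.2) ∈ pj then s + 1 else s
  let s := if (c.1, c.2.1 + 1, c.2.2) ∈ pj then s + 1 else s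
  let s := if (c.1, c.2.1 - 1, c.2.2) ∈ pj then s + 1 else s
  let s := if (c.1, c.2.1, c.2.2 + 1) ∈ pj then s + 1 else s
  if (c.1, c.2.1, c.2.2 - 1) ∈ pj then s + 1 else s

def pvScoreA (pi pj : List (Int × Int × Int)) : Int :=
  pi.foldl (fun s c => pvCellScoreA c pj s) 0

-- A's best_j / best_score scan over j in range(len(pieces))
def pvBestA (ps : List (List (Int × Int × Int))) (i : Nat) : Int × Option Nat :=
  (List.range ps.length).foldl (fun s j =>
    if j = i then s
    else
      let score := pvScoreA (ps.getD i []) (ps.getD j [])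
      if s.1 < score then (score, some j) else s) (-1, none)

-- max(range(len(pieces)), key=lambda k: (k != i, len(pieces[k]))) — first maximum wins
def pvFallbackA (ps : List (List (Int × Int × Int))) (i : Nat) : Nat :=
  ((List.range ps.length).drop 1).foldl (fun best k =>
    let kb := ((if best ≠ i then (1 : Int) else 0), ((ps.getD best []).length : Int))
    let kk := ((if k ≠ i then (1 : Int) else 0), ((ps.getD k []).length : Int))
    if kb.1 < kk.1 ∨ (kb.1 = kk.1 ∧ kb.2 < kk.2) then k else best) 0

-- pieces[best_j] |= pieces[i]; pieces.pop(i)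
def pvMergeA (ps : List (List (Int × Int × Int))) (i bj : Nat) : List (List (Int × Int × Int)) :=
  (ps.set bj (PySem.Set.union (ps.getD bj []) (ps.getD i []))).eraseIdx i

-- the while-changed loop: each pass merges the first too-small piece, then restarts
def pvLoopA (ps : List (List (Int × Int × Int))) (m : Int) : List (List (Int × Int × Int)) :=
  match h : ps.findIdx? (fun p => decide ((p.length : Int) < m)) with
  | none => ps
  | some i =>
    let bj := match (pvBestA ps i).2 with
      | some j => j
      | none => pvFallbackA ps i
    pvLoopA (pvMergeA ps i bj) m
termination_by ps.length
decreasing_by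
  have hi : i < ps.length := by
    have := List.findIdx?_eq_some_iff_findIdx_eq.mp h
    exact this.1
  simp [pvMergeA, List.length_eraseIdx, List.length_set, hi]
  omega

def enforce_min_piece (pieces : List (List (Int × Int × Int))) (min_piece : Int) : List (List (Int × Int × Int)) :=
  pvLoopA (pieces.map (fun p => PySem.Set.ofList p)) min_piece

-- ===== PORT B =====
-- the 6 axis neighbours of a cell
def pvSix (c : Int × Int × Int) : List (Int × Int × Int) :=
  [(c.1 + 1, c.2.1, c.2.2), (c.1 - 1, c.2.1, c.2.2),
   (c.1, c.2.1 + 1, c.2.2), (c.1, c.2.1 - 1, c.2.2),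
   (c.1, c.2.1, c.2.2 + 1), (c.1, c.2.1, c.2.2 - 1)]

-- sum(cnt.get(c, 0) for c in ps[j])
def pvScoreB (cnt : PySem.Dict (Int × Int × Int) Int) (pj : List (Int × Int × Int)) : Int :=
  pj.foldl (fun s c => s + cnt.getD c 0) 0

-- B's single forward pass: index i advances over pieces already big enough
def pvLoopB (ps : List (List (Int × Int × Int))) (m : Int) (i : Nat) : List (List (Int × Int × Int)) :=
  if h : i < ps.length then
    if m ≤ ((ps.getD i []).length : Int) then pvLoopB ps m (i + 1)
    else if ps.length = 1 then pvLoopB (ps.eraseIdx i) m i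
    else
      let cnt := ((ps.getD i []).flatMap pvSix).foldl
        (fun d n => d.modify n 0 (· + 1)) PySem.Dict.empty
      let bj := (PySem.List.max? ((List.range ps.length).filter (fun j => decide (j ≠ i)))
        (fun j => pvScoreB cnt (ps.getD j []))).getD 0
      pvLoopB ((ps.set bj (PySem.Set.union (ps.getD bj []) (ps.getD i []))).eraseIdx i) m i
  else ps
termination_by ps.length - i
decreasing_by
  · omega
  · simp [List.length_eraseIdx, h]; omega
  · simp [List.length_eraseIdx, List.length_set, h]; omega

def enforce_min_piece_alt (pieces : List (List (Int × Int × Int))) (min_piece : Int) : List (List (Int × Int × Int)) :=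
  pvLoopB (pieces.map (fun p => PySem.Set.ofList p)) min_piece 0

-- ===== PRECONDITION & SPEC =====
def Spec_enforce_min_piece (pieces : List (List (Int × Int × Int))) (min_piece : Int) (out : List (List (Int × Int × Int))) : Prop := out = enforce_min_piece_alt pieces min_piece
instance (pieces : List (List (Int × Int × Int))) (min_piece : Int) (out : List (List (Int × Int × Int))) : Decidable (Spec_enforce_min_piece pieces min_piece out) := by unfold Spec_enforce_min_piece; infer_instance

-- ===== CLAIM (what is proved, stated in full; the proofs are below) =====
def Claim_equal_enforce_min_piece : Prop := ∀ (pieces : List (List (Int × Int × Int))) (min_piece : Int), Dom_enforce_min_piece pieces min_piece → Spec_enforce_min_piece pieces min_piece (enforce_min_piece pieces min_piece)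


-- ===== LEMMAS AND PROOFS =====

-- countP of the six-neighbour list of a cell
def pvCellCnt (c : Int × Int × Int) (pj : List (Int × Int × Int)) : Nat :=
  (pvSix c).countP (fun e => decide (e ∈ pj))

theorem pv_cell (c : Int × Int × Int) (pj : List (Int × Int × Int)) (s : Int) :
    pvCellScoreA c pj s = s + (pvCellCnt c pj : Int) := by
  simp only [pvCellScoreA, pvCellCnt, pvSix, List.countP_cons, List.countP_nil,
    decide_eq_true_eq]
  split_ifs <;> push_cast <;> omega

theorem pv_scoreA_aux (pj : List (Int × Int × Int)) : ∀ (pi : List (Int × Int × Int)) (s : Int),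
    pi.foldl (fun s c => pvCellScoreA c pj s) s = s + (pi.map (fun c => (pvCellCnt c pj : Int))).sum := by
  intro pi
  induction pi with
  | nil => intro s; simp
  | cons a t ih =>
    intro s
    simp only [List.foldl_cons, List.map_cons, List.sum_cons, pv_cell]
    rw [PySem.List.foldl_add]
    ring

theorem pv_scoreA_sum (pi pj : List (Int × Int × Int)) :
    pvScoreA pi pj = (pi.map (fun c => (pvCellCnt c pj : Int))).sum := by
  unfold pvScoreA
  rw [pv_scoreA_aux]
  omega

theorem pv_scoreA_nonneg (pi pj : List (Int × Int × Int)) : 0 ≤ pvScoreA pi pj := by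
  rw [pv_scoreA_sum]
  apply List.sum_nonneg
  intro x hx
  simp only [List.mem_map] at hx
  obtain ⟨c, _, rfl⟩ := hx
  positivity

theorem pv_countP_cons_mem (a : Int × Int × Int) (t : List (Int × Int × Int))
    (ha : a ∉ t) : ∀ l : List (Int × Int × Int),
    l.countP (fun e => decide (e ∈ a :: t)) = l.count a + l.countP (fun e => decide (e ∈ t)) := by
  intro l
  induction l with
  | nil => simp
  | cons x xs ih =>
    rw [List.countP_cons, List.countP_cons, List.count_cons, ih]
    by_cases hxa : x = a
    · subst hxa
      simp [List.mem_cons, ha]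
      omega
    · by_cases hxt : x ∈ t <;> simp [List.mem_cons, hxa, hxt] <;> omega

theorem pv_count_nodup : ∀ (pj l : List (Int × Int × Int)), pj.Nodup →
    (pj.map (fun c => l.count c)).sum = l.countP (fun e => decide (e ∈ pj)) := by
  intro pj
  induction pj with
  | nil => simp
  | cons a t ih =>
    intro l hnd
    rw [List.nodup_cons] at hnd
    simp only [List.map_cons, List.sum_cons, ih l hnd.2, pv_countP_cons_mem a t hnd.1 l]

theorem pv_score_eq (pi pj : List (Int × Int × Int)) (h : pj.Nodup) :
    pvScoreB (PySem.Dict.counter (pi.flatMap pvSix)) pj = pvScoreA pi pj := by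
  unfold pvScoreB
  rw [PySem.List.foldl_add]
  have h1 : pj.map (fun c => (PySem.Dict.counter (pi.flatMap pvSix)).getD c 0)
      = pj.map (fun c => (((pi.flatMap pvSix).count c : Nat) : Int)) := by
    apply List.map_congr_left
    intro c _
    exact PySem.Dict.getD_counter _ c
  rw [h1]
  have h2 : pj.map (fun c => (((pi.flatMap pvSix).count c : Nat) : Int))
      = (pj.map (fun c => (pi.flatMap pvSix).count c)).map (fun n : Nat => (n : Int)) := by
    simp [List.map_map, Function.comp]
  rw [h2, ← Nat.cast_list_sum, pv_count_nodup pj _ h, List.countP_flatMap,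
    pv_scoreA_sum]
  have h3 : pi.map (fun c => (pvCellCnt c pj : Int))
      = (pi.map (List.countP (fun e => decide (e ∈ pj)) ∘ pvSix)).map (fun n : Nat => (n : Int)) := by
    simp [List.map_map, Function.comp, pvCellCnt]
  rw [h3, ← Nat.cast_list_sum]
  simp

-- skipping j = i inside the fold is folding over the filtered list
theorem pv_skip_filter {β : Type} (i : Nat) (g : β → Nat → β) :
    ∀ (l : List Nat) (init : β),
    l.foldl (fun s j => if j = i then s else g s j) init
      = (l.filter (fun j => decide (j ≠ i))).foldl g init := by
  intro l
  induction l with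
  | nil => intro init; rfl
  | cons a t ih =>
    intro init
    by_cases h : a = i <;> simp [h, List.filter_cons, ih]

def pvEnc (f : Nat → Int) : Option Nat → Int × Option Nat
  | none => (-1, none)
  | some m => (f m, some m)

-- A's running strict-max scan is PySem's first-extremal max? when all keys are ≥ 0
theorem pv_scan_max (f : Nat → Int) : ∀ (l : List Nat), (∀ j ∈ l, 0 ≤ f j) →
    ∀ (acc : Option Nat),
    l.foldl (fun s j => if s.1 < f j then (f j, some j) else s) (pvEnc f acc)
      = pvEnc f (l.foldl (fun a x => match a with
          | none => some x
          | some m => if f m < f x then some x else some m) acc) := by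
  intro l
  induction l with
  | nil => intro _ acc; rfl
  | cons a t ih =>
    intro h acc
    have h0 : 0 ≤ f a := h a (by simp)
    have ht : ∀ j ∈ t, 0 ≤ f j := fun j hj => h j (by simp [hj])
    cases acc with
    | none =>
      have e1 : (if (pvEnc f none).1 < f a then (f a, some a) else pvEnc f none)
          = pvEnc f (some a) := by
        simp only [pvEnc]
        rw [if_pos (by omega)]
      simp only [List.foldl_cons]
      rw [e1, ih ht (some a)]
    | some m =>
      by_cases hma : f m < f a
      · have e1 : (if (pvEnc f (some m)).1 < f a then (f a, some a) else pvEnc f (some m))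
            = pvEnc f (some a) := by simp [pvEnc, hma]
        simp only [List.foldl_cons]
        rw [e1, ih ht (some a)]
        simp [hma]
      · have e1 : (if (pvEnc f (some m)).1 < f a then (f a, some a) else pvEnc f (some m))
            = pvEnc f (some m) := by simp [pvEnc, hma]
        simp only [List.foldl_cons]
        rw [e1, ih ht (some m)]
        simp [hma]

theorem pv_enc_snd (f : Nat → Int) (o : Option Nat) : (pvEnc f o).2 = o := by
  cases o <;> rfl

-- A's best_j scan equals max? over range-minus-i
theorem pv_bestA_eq_max? (ps : List (List (Int × Int × Int))) (i : Nat) :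
    (pvBestA ps i).2 = PySem.List.max?
      ((List.range ps.length).filter (fun j => decide (j ≠ i)))
      (fun j => pvScoreA (ps.getD i []) (ps.getD j [])) := by
  unfold pvBestA
  rw [show (fun (s : Int × Option Nat) j =>
        if j = i then s
        else
          let score := pvScoreA (ps.getD i []) (ps.getD j [])
          if s.1 < score then (score, some j) else s)
      = (fun (s : Int × Option Nat) j =>
        if j = i then s
        else if s.1 < pvScoreA (ps.getD i []) (ps.getD j []) then
          (pvScoreA (ps.getD i []) (ps.getD j []), some j) else s) from rfl]
  rw [pv_skip_filter]
  rw [show ((-1 : Int), (none : Option Nat))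
      = pvEnc (fun j => pvScoreA (ps.getD i []) (ps.getD j [])) none from rfl]
  rw [pv_scan_max _ _ (fun j _ => pv_scoreA_nonneg _ _) none]
  rw [pv_enc_snd]
  unfold PySem.List.max?
  congr 1
  funext a x
  cases a <;> simp

theorem pv_getD_lt (ps : List (List (Int × Int × Int))) (k : Nat) (h : k < ps.length) :
    ps.getD k [] = ps[k] := by
  rw [List.getD_eq_getElem?_getD, List.getElem?_eq_getElem h]
  rfl

-- set operations preserve distinctness and never shrink
theorem pv_add_nodup (s : List (Int × Int × Int)) (x : Int × Int × Int)
    (h : s.Nodup) : (PySem.Set.add s x).Nodup := by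
  unfold PySem.Set.add
  split_ifs with hc
  · exact h
  · have hx : x ∉ s := by simpa using hc
    simp only [List.nodup_append, List.nodup_cons, List.not_mem_nil, not_false_iff,
      List.nodup_nil, and_true, true_and]
    exact ⟨h, fun a ha b hb => by simp only [List.mem_singleton] at hb; subst hb; exact fun he => hx (he ▸ ha)⟩

theorem pv_union_nodup (s t : List (Int × Int × Int)) (h : s.Nodup) :
    (PySem.Set.union s t).Nodup := by
  unfold PySem.Set.union PySem.Set.update
  induction t generalizing s with
  | nil => exact h
  | cons a t ih => exact ih _ (pv_add_nodup s a h)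

theorem pv_add_len (s : List (Int × Int × Int)) (x : Int × Int × Int) :
    s.length ≤ (PySem.Set.add s x).length := by
  unfold PySem.Set.add
  split_ifs <;> simp

theorem pv_union_len (s t : List (Int × Int × Int)) :
    s.length ≤ (PySem.Set.union s t).length := by
  unfold PySem.Set.union PySem.Set.update
  induction t generalizing s with
  | nil => exact le_refl _
  | cons a t ih => exact le_trans (pv_add_len s a) (ih _)

theorem pv_getD_nodup (ps : List (List (Int × Int × Int)))
    (hnd : ∀ p ∈ ps, p.Nodup) (j : Nat) : (ps.getD j []).Nodup := by
  by_cases hj : j < ps.length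
  · rw [List.getD_eq_getElem?_getD, List.getElem?_eq_getElem hj]
    exact hnd _ (List.getElem_mem hj)
  · rw [List.getD_eq_getElem?_getD, List.getElem?_eq_none (by omega)]
    exact List.nodup_nil

theorem pvLoopA_none (ps : List (List (Int × Int × Int))) (m : Int)
    (h : ps.findIdx? (fun p => decide ((p.length : Int) < m)) = none) :
    pvLoopA ps m = ps := by
  rw [pvLoopA]
  split
  · rfl
  · rename_i i heq
    rw [h] at heq
    cases heq

theorem pvLoopA_some (ps : List (List (Int × Int × Int))) (m : Int) (i : Nat)
    (h : ps.findIdx? (fun p => decide ((p.length : Int) < m)) = some i) :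
    pvLoopA ps m = pvLoopA (pvMergeA ps i (match (pvBestA ps i).2 with
      | some j => j
      | none => pvFallbackA ps i)) m := by
  rw [pvLoopA]
  split
  · rename_i heq
    rw [h] at heq
    cases heq
  · rename_i j heq
    rw [h] at heq
    injection heq with heq
    subst heq
    rfl

theorem pv_main : ∀ (fuel : Nat) (ps : List (List (Int × Int × Int))) (m : Int) (i : Nat),
    ps.length + (ps.length - i) ≤ fuel →
    i ≤ ps.length →
    (∀ p ∈ ps, p.Nodup) →
    (∀ k, k < i → m ≤ ((ps.getD k []).length : Int)) →
    pvLoopB ps m i = pvLoopA ps m := by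
  intro fuel
  induction fuel with
  | zero =>
    intro ps m i hf hile hnd hinv
    have h0 : ps.length = 0 := by omega
    have hnil : ps = [] := List.eq_nil_of_length_eq_zero h0
    subst hnil
    rw [pvLoopB, pvLoopA_none [] m (by simp)]
    simp
  | succ fuel ih =>
    intro ps m i hf hile hnd hinv
    by_cases hlt : i < ps.length
    · by_cases hbig : m ≤ ((ps.getD i []).length : Int)
      · -- piece i is big enough: B advances, A unchanged
        conv_lhs => rw [pvLoopB]
        rw [dif_pos hlt, if_pos hbig]
        refine ih ps m (i + 1) (by omega) (by omega) hnd ?_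
        intro k hk
        rcases Nat.lt_succ_iff_lt_or_eq.mp hk with h | h
        · exact hinv k h
        · subst h; exact hbig
      · -- piece i is the first too-small piece
        have hfind : ps.findIdx? (fun p => decide ((p.length : Int) < m)) = some i := by
          rw [List.findIdx?_eq_some_iff_findIdx_eq]
          refine ⟨hlt, (List.findIdx_eq hlt).mpr ⟨?_, ?_⟩⟩
          · have h1 : ((ps[i]).length : Int) < m := by
              have h2 := hbig
              rw [pv_getD_lt ps i hlt] at h2
              omega
            show decide ((ps[i].length : Int) < m) = true
            simp only [decide_eq_true_eq]
            exact h1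
          · intro j hj
            have h1 := hinv j hj
            rw [pv_getD_lt ps j (by omega)] at h1
            show decide ((ps[j].length : Int) < m) = false
            simp only [decide_eq_false_iff_not, not_lt]
            exact h1
        by_cases hone : ps.length = 1
        · -- a single undersized piece: both sides end with []
          have hi0 : i = 0 := by omega
          subst hi0
          have hBm : ps.eraseIdx 0 = [] := by
            apply List.eq_nil_of_length_eq_zero
            rw [List.length_eraseIdx]
            simp [hone]
          conv_lhs => rw [pvLoopB]
          rw [dif_pos hlt, if_neg hbig, if_pos hone, hBm]
          conv_lhs => rw [pvLoopB]
          rw [dif_neg (by simp)]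
          rw [pvLoopA_some ps m 0 hfind]
          have hAm : pvMergeA ps 0 (match (pvBestA ps 0).2 with
              | some j => j
              | none => pvFallbackA ps 0) = [] := by
            apply List.eq_nil_of_length_eq_zero
            unfold pvMergeA
            rw [List.length_eraseIdx]
            simp [List.length_set, hone]
          rw [hAm, pvLoopA_none [] m (by simp)]
        · -- at least two pieces: both sides merge into the same best_j
          have h2 : 2 ≤ ps.length := by omega
          have hcne : (List.range ps.length).filter (fun j => decide (j ≠ i)) ≠ [] := by
            apply List.ne_nil_of_mem (a := if i = 0 then 1 else 0)
            simp only [List.mem_filter, List.mem_range, decide_eq_true_eq]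
            by_cases hi0 : i = 0 <;> simp [hi0] <;> omega
          obtain ⟨mx, hmx⟩ : ∃ x, PySem.List.max?
              ((List.range ps.length).filter (fun j => decide (j ≠ i)))
              (fun j => pvScoreA (ps.getD i []) (ps.getD j [])) = some x := by
            cases hq : PySem.List.max?
                ((List.range ps.length).filter (fun j => decide (j ≠ i)))
                (fun j => pvScoreA (ps.getD i []) (ps.getD j [])) with
            | none => exact absurd ((PySem.List.max?_eq_none_iff _ _).mp hq) hcne
            | some x => exact ⟨x, rfl⟩
          have hmxmem : mx ∈ (List.range ps.length).filter (fun j => decide (j ≠ i)) :=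
            PySem.List.max?_mem hmx
          have hmxlt : mx < ps.length := by
            simp only [List.mem_filter, List.mem_range] at hmxmem
            exact hmxmem.1
          have hA : (pvBestA ps i).2 = some mx := by
            rw [pv_bestA_eq_max?]; exact hmx
          have hkeys : (fun j => pvScoreB
              (PySem.Dict.counter ((ps.getD i []).flatMap pvSix)) (ps.getD j []))
              = (fun j => pvScoreA (ps.getD i []) (ps.getD j [])) := by
            funext j
            exact pv_score_eq _ _ (pv_getD_nodup ps hnd j)
          rw [pvLoopA_some ps m i hfind]
          simp only [hA]
          conv_lhs => rw [pvLoopB]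
          rw [dif_pos hlt, if_neg hbig, if_neg hone]
          simp only [← PySem.Dict.counter_eq_foldl, hkeys, hmx, Option.getD_some]
          unfold pvMergeA
          refine ih _ m i ?_ ?_ ?_ ?_
          · rw [List.length_eraseIdx, List.length_set]
            simp [hlt]
            omega
          · rw [List.length_eraseIdx, List.length_set]
            simp [hlt]
            omega
          · intro p hp
            rcases List.mem_or_eq_of_mem_set (List.mem_of_mem_eraseIdx hp) with h | h
            · exact hnd p h
            · subst h
              exact pv_union_nodup _ _ (pv_getD_nodup ps hnd mx)
          · intro k hk
            rw [List.getD_eq_getElem?_getD, List.getElem?_eraseIdx_of_lt hk,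
              List.getElem?_set]
            by_cases hmk : mx = k
            · subst hmk
              rw [if_pos rfl, if_pos hmxlt]
              have h1 := hinv mx hk
              have h2 := pv_union_len (ps.getD mx []) (ps.getD i [])
              simp only [Option.getD_some]
              calc m ≤ ((ps.getD mx []).length : Int) := h1
                _ ≤ _ := by exact_mod_cast h2
            · rw [if_neg hmk, ← List.getD_eq_getElem?_getD]
              exact hinv k hk
    · -- i = length: every piece is big enough, A finds nothing
      have hnone : ps.findIdx? (fun p => decide ((p.length : Int) < m)) = none := by
        rw [List.findIdx?_eq_none_iff]
        intro x hx
        obtain ⟨k, hk, rfl⟩ := List.mem_iff_getElem.mp hx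
        have := hinv k (by omega)
        rw [pv_getD_lt ps k hk] at this
        simp
        omega
      conv_lhs => rw [pvLoopB]
      rw [dif_neg hlt, pvLoopA_none ps m hnone]

-- ===== VERDICT (by name: the statement is the Claim_ definition above) =====
theorem enforce_min_piece_spec : Claim_equal_enforce_min_piece := by
  intro pieces m _
  unfold Spec_enforce_min_piece enforce_min_piece enforce_min_piece_alt
  refine (pv_main (2 * (pieces.map (fun p => PySem.Set.ofList p)).length) _ m 0 (by omega) (by omega) ?_ (by omega)).symm
  intro p hp
  simp only [List.mem_map] at hp
  obtain ⟨q, _, rfl⟩ := hp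
  exact PySem.Set.nodup_ofList q
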